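-- pv_equiv track=rewrite | github.com/IAMspiegel/LLMGerMedIE | medicaNLP/instructionTuning/build_instruct_data.py | split_i2b22010_into_sections
-- ===== SOURCE A (Python) =====
-- from typing import List, Tuple, Dict
--
-- def split_i2b22010_into_sections(text_with_concepts: List[dict], max_lines_per_section: int = 8, max_len: int = 2048):
--     """
--     Method to split text file into sections and match the concepts of that text to the section.
--     Indicator for a new section is `:\n` or the count of text lines.
--     """
--     sections_with_concepts: List[dict] = []
--
--     # helper vars
--     temp_section: List[dict] = []
--     _line_count = 0
--
--     for i, txt_line in enumerate(text_with_concepts):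
--
--         # end condition
--         if i == len(text_with_concepts) - 1:
--             temp_section.append(txt_line)
--             sections_with_concepts.append(temp_section)
--         else:
--             # start of new section
--             if txt_line['text'].endswith(':\n') or _line_count == max_lines_per_section:
--                 # new section -> process section before
--                 if temp_section:
--                     sections_with_concepts.append(temp_section)
--                 # create new temp section
--                 temp_section = [txt_line]
--                 _line_count = 0
--             else:
--                 temp_section.append(txt_line)
--                 _line_count += 1
--
--     return sections_with_concepts
-- ===== SOURCE B (Python) =====
-- def split_i2b22010_into_sections(text_with_concepts, max_lines_per_section=8, max_len=2048):
--     """Two-pass version: first compute the section start indices, then slice."""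
--     n = len(text_with_concepts)
--     if n == 0:
--         return []
--     starts = [0]
--     count = 0
--     # the final line never opens a new section
--     for i, txt_line in enumerate(text_with_concepts[:-1]):
--         if txt_line['text'].endswith(':\n') or count == max_lines_per_section:
--             if i > 0:
--                 starts.append(i)
--             count = 0
--         else:
--             count += 1
--     bounds = starts + [n]
--     return [text_with_concepts[s:e] for s, e in zip(bounds, bounds[1:])]
-- ===== Notes on version B (the rewrite author's own statement) =====
-- stated objective: alternative
-- what changed: B replaces A's live temp_section accumulator with a two-pass decomposition: a first pass records the indices where sections start (the last line never opens one, index 0 is never re-recorded), and a second pass materialises each section by slicing the input between consecutive starts. Pre_ excludes inputs where a line other than the last has no 'text' key: there A raises KeyError (B does too).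
import Mathlib
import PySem

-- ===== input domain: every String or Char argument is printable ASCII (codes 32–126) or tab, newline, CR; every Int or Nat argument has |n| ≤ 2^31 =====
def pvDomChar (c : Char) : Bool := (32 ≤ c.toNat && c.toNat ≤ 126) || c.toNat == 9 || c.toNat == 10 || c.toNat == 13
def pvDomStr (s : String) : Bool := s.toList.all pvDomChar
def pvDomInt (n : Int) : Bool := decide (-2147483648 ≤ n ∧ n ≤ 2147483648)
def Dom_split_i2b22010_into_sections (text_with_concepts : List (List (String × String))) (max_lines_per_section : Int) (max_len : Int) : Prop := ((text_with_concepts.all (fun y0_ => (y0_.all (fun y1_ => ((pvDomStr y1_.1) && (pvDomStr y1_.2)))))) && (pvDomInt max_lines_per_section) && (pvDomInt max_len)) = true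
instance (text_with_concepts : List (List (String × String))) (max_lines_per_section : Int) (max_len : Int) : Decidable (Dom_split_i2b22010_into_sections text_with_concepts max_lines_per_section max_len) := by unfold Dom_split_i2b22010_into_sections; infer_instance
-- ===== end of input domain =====

-- B replaces A's live section accumulator by a first pass that records the section-start
-- indices and a second pass that slices the input between consecutive starts (objective:
-- alternative decomposition, same O(n) cost).

-- ===== PORT A =====
-- txt_line['text'] (KeyError when absent is excluded by Pre_; the getD default is never used there)
def pvTextOf (line : List (String × String)) : String :=
  ((PySem.Dict.mk line).get? "text").getD ""

-- one iteration of A's for-loop; state = (sections_with_concepts, temp_section, _line_count)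
def pvAStep (lastIdx : Int) (mlps : Int)
    (st : List (List (List (String × String))) × List (List (String × String)) × Int)
    (p : Int × List (String × String)) :
    List (List (List (String × String))) × List (List (String × String)) × Int :=
  if p.1 = lastIdx then
    (st.1 ++ [st.2.1 ++ [p.2]], st.2.1 ++ [p.2], st.2.2)
  else
    if PySem.Str.endswith (pvTextOf p.2) ":\n" || decide (st.2.2 = mlps) then
      ((if st.2.1 ≠ [] then st.1 ++ [st.2.1] else st.1), [p.2], 0)
    else
      (st.1, st.2.1 ++ [p.2], st.2.2 + 1)

def split_i2b22010_into_sections (text_with_concepts : List (List (String × String))) (max_lines_per_section : Int) (max_len : Int) : List (List (List (String × String))) :=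
  ((PySem.List.enumerate text_with_concepts 0).foldl
    (pvAStep ((text_with_concepts.length : Int) - 1) max_lines_per_section)
    ([], [], 0)).1

-- ===== PORT B =====
-- one iteration of B's first pass; state = (starts, count)
def pvBStep (mlps : Int) (st : List Int × Int) (p : Int × List (String × String)) : List Int × Int :=
  if PySem.Str.endswith (pvTextOf p.2) ":\n" || decide (st.2 = mlps) then
    ((if p.1 > 0 then st.1 ++ [p.1] else st.1), 0)
  else
    (st.1, st.2 + 1)

def split_i2b22010_into_sections_alt (text_with_concepts : List (List (String × String))) (max_lines_per_section : Int) (max_len : Int) : List (List (List (String × String))) :=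
  if text_with_concepts.length = 0 then []
  else
    let st := (PySem.List.enumerate (PySem.List.slice text_with_concepts none (some (-1))) 0).foldl
      (pvBStep max_lines_per_section) ([0], 0)
    let bounds := st.1 ++ [(text_with_concepts.length : Int)]
    (bounds.zip bounds.tail).map
      (fun se => PySem.List.slice text_with_concepts (some se.1) (some se.2))

-- ===== PRECONDITION & SPEC =====
-- Pre_ excludes inputs where some line other than the last has no 'text' key: there the
-- Python A raises KeyError (the last line's dict is never inspected).
def Pre_split_i2b22010_into_sections (text_with_concepts : List (List (String × String))) (max_lines_per_section : Int) (max_len : Int) : Prop :=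
  ∀ line ∈ text_with_concepts.dropLast, "text" ∈ line.map Prod.fst
instance (text_with_concepts : List (List (String × String))) (max_lines_per_section : Int) (max_len : Int) : Decidable (Pre_split_i2b22010_into_sections text_with_concepts max_lines_per_section max_len) := by unfold Pre_split_i2b22010_into_sections; infer_instance

def pvWitness_split_i2b22010_into_sections : (List (List (String × String))) × Int × Int :=
  ([[("text", "intro:\n")], [("text", "a line\n")], [("text", "last\n")]], 8, 2048)

def Spec_split_i2b22010_into_sections (text_with_concepts : List (List (String × String))) (max_lines_per_section : Int) (max_len : Int) (out : List (List (List (String × String)))) : Prop := out = split_i2b22010_into_sections_alt text_with_concepts max_lines_per_section max_len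
instance (text_with_concepts : List (List (String × String))) (max_lines_per_section : Int) (max_len : Int) (out : List (List (List (String × String)))) : Decidable (Spec_split_i2b22010_into_sections text_with_concepts max_lines_per_section max_len out) := by unfold Spec_split_i2b22010_into_sections; infer_instance

-- ===== CLAIM (what is proved, stated in full; the proofs are below) =====
def Claim_equal_split_i2b22010_into_sections : Prop := ∀ (text_with_concepts : List (List (String × String))) (max_lines_per_section : Int) (max_len : Int), Dom_split_i2b22010_into_sections text_with_concepts max_lines_per_section max_len → Pre_split_i2b22010_into_sections text_with_concepts max_lines_per_section max_len → Spec_split_i2b22010_into_sections text_with_concepts max_lines_per_section max_len (split_i2b22010_into_sections text_with_concepts max_lines_per_section max_len)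

-- ===== LEMMAS AND PROOFS =====

-- slice of `xs` from `s` (inclusive) to `e` (exclusive), Nat bounds
def pvSl (xs : List (List (String × String))) (s e : Nat) : List (List (String × String)) :=
  (xs.drop s).take (e - s)

-- the sections determined by a list of start indices (adjacent pairs)
def pvSecs (front : List (List (String × String))) (starts : List Int) : List (List (List (String × String))) :=
  (starts.zip starts.tail).map (fun p => pvSl front p.1.toNat p.2.toNat)

lemma pvEnumAppend {α : Type} (xs ys : List α) (s : Int) :
    PySem.List.enumerate (xs ++ ys) s
      = PySem.List.enumerate xs s ++ PySem.List.enumerate ys (s + xs.length) := by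
  induction xs generalizing s with
  | nil => simp [PySem.List.enumerate_nil]
  | cons x xs ih => simp [PySem.List.enumerate_cons, ih]; ring_nf

lemma pvZipTailSnoc {α : Type} (l : List α) (a : α) (h : l ≠ []) :
    (l ++ [a]).zip (l ++ [a]).tail = l.zip l.tail ++ [(l.getLast h, a)] := by
  induction l with
  | nil => simp at h
  | cons x xs ih =>
    cases xs with
    | nil => simp
    | cons y ys =>
      have := ih (by simp)
      simp only [List.cons_append, List.zip_cons_cons, List.tail_cons] at this ⊢
      rw [List.getLast_cons (by simp)]
      simp [this]

lemma pvZipSnoc2 (rest : List Int) (s a : Int) :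
    ((rest ++ [s]) ++ [a]).zip (((rest ++ [s]) ++ [a]).tail)
      = ((rest ++ [s]).zip ((rest ++ [s]).tail)) ++ [(s, a)] := by
  rw [pvZipTailSnoc (rest ++ [s]) a (by simp)]
  simp

lemma pvSl_empty (front : List (List (String × String))) (s : Nat) : pvSl front s s = [] := by
  simp [pvSl]

lemma pvSl_one (front : List (List (String × String))) (k : Nat) (line : List (String × String))
    (h : front.drop k = line :: (front.drop (k+1))) : pvSl front k (k+1) = [line] := by
  simp [pvSl, h]

lemma pvSl_snoc' (front : List (List (String × String))) (s k : Nat) (line : List (String × String))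
    (hs : s ≤ k) (h : front[k]? = some line) :
    pvSl front s (k + 1) = pvSl front s k ++ [line] := by
  have hk : k < front.length := by
    by_contra hk
    rw [List.getElem?_eq_none (by omega)] at h
    simp at h
  have h1 : k + 1 - s = (k - s) + 1 := by omega
  have h2 : (front.drop s)[k - s]? = some line := by
    rw [List.getElem?_drop]
    rwa [Nat.add_sub_cancel' hs]
  simp [pvSl, h1, List.take_add_one, h2]

lemma pvSl_ne_nil (front : List (List (String × String))) (s k : Nat)
    (h1 : s < k) (h2 : k ≤ front.length) : pvSl front s k ≠ [] := by
  have : (pvSl front s k).length = min (k - s) (front.length - s) := by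
    simp [pvSl]
  intro hcon
  rw [hcon] at this
  simp at this
  omega

lemma pvSl_all (front : List (List (String × String))) (s : Nat) (h : s ≤ front.length) :
    pvSl front s front.length = front.drop s := by
  apply List.take_of_length_le
  simp

lemma pvSl_append_last (front : List (List (String × String))) (x : List (String × String))
    (a b : Nat) (hb : b ≤ front.length) : pvSl (front ++ [x]) a b = pvSl front a b := by
  rcases le_or_gt a b with hab | hab
  · rcases le_or_gt a front.length with ha | ha
    · unfold pvSl
      rw [List.drop_append_of_le_length ha, List.take_append_of_le_length (by simp; omega)]
    · exact absurd hb (by omega)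
  · have : b - a = 0 := by omega
    simp [pvSl, this]

-- Main loop invariant: running A's loop body and B's first pass over the same middle
-- lines (indices k, k+1, …) from corresponding states yields corresponding states.
lemma pvLoopInv (mlps : Int) (front : List (List (String × String))) :
    ∀ (l : List (List (String × String))) (k : Nat) (rest : List Int) (s : Nat) (cnt : Int),
    front.drop k = l →
    s ≤ k → (0 < k → s < k) → (k = 0 → rest = []) →
    (∀ x ∈ rest ++ [(s : Int)], 0 ≤ x ∧ x ≤ (k : Int)) →
    ∃ (rest' : List Int) (s' : Nat) (cnt' : Int),
      (PySem.List.enumerate l (k : Int)).foldl (pvBStep mlps) (rest ++ [(s : Int)], cnt)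
        = (rest' ++ [(s' : Int)], cnt') ∧
      (PySem.List.enumerate l (k : Int)).foldl (pvAStep ((front.length : Int)) mlps)
          (pvSecs front (rest ++ [(s : Int)]), pvSl front s k, cnt)
        = (pvSecs front (rest' ++ [(s' : Int)]), pvSl front s' (k + l.length), cnt') ∧
      s' ≤ k + l.length ∧ (0 < k + l.length → s' < k + l.length) ∧
      (k + l.length = 0 → rest' = []) ∧
      (∀ x ∈ rest' ++ [(s' : Int)], 0 ≤ x ∧ x ≤ ((k + l.length : Nat) : Int)) := by
  intro l
  induction l with
  | nil =>
    intro k rest s cnt hdrop hs hsk hk0 hbnd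
    exact ⟨rest, s, cnt, by simp [PySem.List.enumerate_nil], by simp [PySem.List.enumerate_nil],
      by simpa using hs, by simpa using hsk, by simpa using hk0, by simpa using hbnd⟩
  | cons line l' ih =>
    intro k rest s cnt hdrop hs hsk hk0 hbnd
    have hklt : k < front.length := by
      by_contra hk
      rw [List.drop_eq_nil_of_le (by omega)] at hdrop
      simp at hdrop
    have hdrop' : front.drop (k + 1) = l' := by
      have h1 : front.drop (k + 1) = (front.drop k).drop 1 := by rw [List.drop_drop]
      rw [h1, hdrop]
      rfl
    have hget : front[k]? = some line := by
      rw [← List.head?_drop, hdrop]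
      rfl
    have hcast : ((k : Int) + 1) = ((k + 1 : Nat) : Int) := by push_cast; ring
    rw [PySem.List.enumerate_cons, List.foldl_cons, List.foldl_cons, hcast]
    have hAidx : ¬ ((k : Int) = (front.length : Int)) := by
      intro hcon
      omega
    by_cases hC : (PySem.Str.endswith (pvTextOf line) ":\n" || decide (cnt = mlps)) = true
    · -- boundary line
      by_cases hk : k = 0
      · -- first line of the text: temp_section is empty, no start recorded
        subst hk
        have hs0 : s = 0 := by omega
        subst hs0
        have hrest : rest = [] := hk0 rfl
        subst hrest
        have hone : pvSl front 0 (0 + 1) = [line] := pvSl_one front 0 line (by rw [hdrop, hdrop'])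
        have hB : pvBStep mlps ([] ++ [((0:Nat) : Int)], cnt) (((0:Nat) : Int), line)
            = ([] ++ [((0:Nat) : Int)], 0) := by
          simp only [pvBStep]
          rw [if_pos hC, if_neg (by simp)]
        have hA : pvAStep ((front.length : Int)) mlps
            (pvSecs front ([] ++ [((0:Nat) : Int)]), pvSl front 0 0, cnt) (((0:Nat) : Int), line)
            = (pvSecs front ([] ++ [((0:Nat) : Int)]), pvSl front 0 (0 + 1), 0) := by
          simp only [pvAStep]
          rw [if_neg hAidx, if_pos hC, if_neg (by simp [pvSl_empty])]
          all_goals rw [hone]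
        rw [hB, hA]
        have hIH := ih (0 + 1) [] 0 0 hdrop' (by omega) (by omega) (by omega)
          (by intro x hx; simp at hx; subst hx; exact ⟨by omega, by omega⟩)
        obtain ⟨rest', s', cnt', h1, h2, h3, h4, h5, h6⟩ := hIH
        have h4' : s' < 0 + 1 + l'.length := h4 (by omega)
        simp only [List.length_cons]
        rw [show (0:Nat) + 1 + l'.length = 0 + (l'.length + 1) from by omega] at h2
        refine ⟨rest', s', cnt', h1, h2, by omega, by intro _; omega,
          by intro h; exact absurd h (by omega), ?_⟩
        intro x hx
        have hb := h6 x hx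
        refine ⟨hb.1, ?_⟩
        push_cast at hb ⊢
        omega
      · -- k > 0 : temp_section is nonempty, record start k
        have hkpos : 0 < k := Nat.pos_of_ne_zero hk
        have hslt : s < k := hsk hkpos
        have hne : pvSl front s k ≠ [] := pvSl_ne_nil front s k hslt (le_of_lt hklt)
        have hone : pvSl front k (k + 1) = [line] := pvSl_one front k line (by rw [hdrop, hdrop'])
        have hsecs : pvSecs front ((rest ++ [(s : Int)]) ++ [(k : Int)])
            = pvSecs front (rest ++ [(s : Int)]) ++ [pvSl front s k] := by
          unfold pvSecs
          rw [pvZipTailSnoc (rest ++ [(s : Int)]) ((k : Int)) (by simp)]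
          simp
        have hB : pvBStep mlps (rest ++ [(s : Int)], cnt) ((k : Int), line)
            = ((rest ++ [(s : Int)]) ++ [(k : Int)], 0) := by
          simp only [pvBStep]
          rw [if_pos hC, if_pos (show ((k : Int) > 0) by exact_mod_cast hkpos)]
        have hA : pvAStep ((front.length : Int)) mlps
            (pvSecs front (rest ++ [(s : Int)]), pvSl front s k, cnt) ((k : Int), line)
            = (pvSecs front ((rest ++ [(s : Int)]) ++ [(k : Int)]), pvSl front k (k + 1), 0) := by
          simp only [pvAStep]
          rw [if_neg hAidx, if_pos hC, if_pos hne, hsecs, hone]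
        rw [hB, hA]
        have hIH := ih (k + 1) (rest ++ [(s : Int)]) k 0 hdrop' (by omega) (by omega) (by omega)
          (by
            intro x hx
            rw [List.append_assoc] at hx
            rcases List.mem_append.mp hx with hx | hx
            · have hb := hbnd x (List.mem_append.mpr (Or.inl hx))
              exact ⟨hb.1, by push_cast; push_cast at hb; omega⟩
            · simp at hx
              rcases hx with hx | hx <;> subst hx <;> exact ⟨by push_cast; omega, by push_cast; omega⟩)
        obtain ⟨rest', s', cnt', h1, h2, h3, h4, h5, h6⟩ := hIH
        have h4' : s' < k + 1 + l'.length := h4 (by omega)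
        simp only [List.length_cons]
        rw [show k + 1 + l'.length = k + (l'.length + 1) from by omega] at h2
        refine ⟨rest', s', cnt', h1, h2, by omega, by intro _; omega,
          by intro h; exact absurd h (by omega), ?_⟩
        intro x hx
        have hb := h6 x hx
        refine ⟨hb.1, ?_⟩
        push_cast at hb ⊢
        omega
    · -- ordinary line: extend the current section
      have hB : pvBStep mlps (rest ++ [(s : Int)], cnt) ((k : Int), line)
          = (rest ++ [(s : Int)], cnt + 1) := by
        simp only [pvBStep]
        rw [if_neg hC]
      have hA : pvAStep ((front.length : Int)) mlps
          (pvSecs front (rest ++ [(s : Int)]), pvSl front s k, cnt) ((k : Int), line)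
          = (pvSecs front (rest ++ [(s : Int)]), pvSl front s (k + 1), cnt + 1) := by
        simp only [pvAStep]
        rw [if_neg hAidx, if_neg hC, pvSl_snoc' front s k line hs hget]
      rw [hB, hA]
      have hIH := ih (k + 1) rest s (cnt + 1) hdrop' (by omega) (by omega) (by omega)
        (by intro x hx; have hb := hbnd x hx; exact ⟨hb.1, by push_cast; push_cast at hb; omega⟩)
      obtain ⟨rest', s', cnt', h1, h2, h3, h4, h5, h6⟩ := hIH
      have h4' : s' < k + 1 + l'.length := h4 (by omega)
      simp only [List.length_cons]
      rw [show k + 1 + l'.length = k + (l'.length + 1) from by omega] at h2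
      refine ⟨rest', s', cnt', h1, h2, by omega, by intro _; omega,
        by intro h; exact absurd h (by omega), ?_⟩
      intro x hx
      have hb := h6 x hx
      refine ⟨hb.1, ?_⟩
      push_cast at hb ⊢
      omega

-- ===== VERDICT (by name: the statement is the Claim_ definition above) =====
theorem split_i2b22010_into_sections_spec : Claim_equal_split_i2b22010_into_sections := by
  intro twc mlps ml _dom _pre
  unfold Spec_split_i2b22010_into_sections split_i2b22010_into_sections split_i2b22010_into_sections_alt
  by_cases hnil : twc = []
  · subst hnil
    simp [PySem.List.enumerate_nil]
  · obtain ⟨front, last, rfl⟩ : ∃ front last, twc = front ++ [last] :=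
      ⟨twc.dropLast, twc.getLast hnil, (List.dropLast_append_getLast hnil).symm⟩
    rw [if_neg (by simp)]
    rw [PySem.List.slice_to_neg_one]
    rw [show (front ++ [last]).dropLast = front from by simp]
    rw [show (((front ++ [last]).length : Int) - 1) = ((front.length : Int)) from by
      push_cast [List.length_append, List.length_singleton]; omega]
    rw [pvEnumAppend front [last] 0, List.foldl_append]
    rw [show PySem.List.enumerate [last] ((0 : Int) + (front.length : Int))
        = [((front.length : Int), last)] from by
      simp [PySem.List.enumerate_cons, PySem.List.enumerate_nil]]
    have hInv := pvLoopInv mlps front front 0 [] 0 0 (by simp) (le_refl 0) (by omega)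
      (fun _ => rfl) (by intro x hx; simp at hx; subst hx; exact ⟨by omega, by omega⟩)
    obtain ⟨rest', s', cnt', hB1, hA1, h3, h4, h5, h6⟩ := hInv
    simp only [Nat.cast_zero, Nat.zero_add, List.nil_append] at hB1 hA1 h3 h6
    rw [show pvSecs front [(0 : Int)] = [] from rfl] at hA1
    rw [show pvSl front 0 0 = [] from rfl] at hA1
    rw [hA1]
    simp only [List.foldl_cons, List.foldl_nil]
    rw [show pvAStep ((front.length : Int)) mlps
        (pvSecs front (rest' ++ [(s' : Int)]), pvSl front s' front.length, cnt')
        ((front.length : Int), last)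
      = (pvSecs front (rest' ++ [(s' : Int)]) ++ [pvSl front s' front.length ++ [last]],
         pvSl front s' front.length ++ [last], cnt') from by
      simp only [pvAStep]
      simp]
    simp only [hB1]
    rw [pvZipSnoc2 rest' ((s' : Int)) (((front ++ [last]).length : Int))]
    rw [List.map_append]
    congr 1
    · unfold pvSecs
      refine List.map_congr_left ?_
      intro p hp
      have hp1 : p.1 ∈ rest' ++ [(s' : Int)] := (List.of_mem_zip hp).1
      have hp2 : p.2 ∈ rest' ++ [(s' : Int)] := List.mem_of_mem_tail (List.of_mem_zip hp).2
      have hb1 := h6 p.1 hp1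
      have hb2 := h6 p.2 hp2
      rw [PySem.List.slice_toNat _ hb1.1 hb2.1]
      exact (pvSl_append_last front last p.1.toNat p.2.toNat (by omega)).symm
    · simp only [List.map_cons, List.map_nil]
      rw [PySem.List.slice_toNat _ (by omega) (by omega)]
      have hs'le : s' ≤ front.length := by omega
      rw [pvSl_all front s' hs'le]
      rw [show ((s' : Int)).toNat = s' from by simp]
      rw [show (((front ++ [last]).length : Int)).toNat = front.length + 1 from by simp]
      rw [List.drop_append_of_le_length hs'le]
      rw [List.take_of_length_le (by simp; omega)]
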